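-- pv_equiv track=rewrite | github.com/IgnasJ/Kriptografijos-ir-informacijos-saugos-pratybos | 10prat.py | i_teksta
-- ===== SOURCE A (Python) =====
-- A='abcdefghijklmnopqrstuvwxyz'
--
-- def i_teksta(M):
--     n=M
--     text=''
--     while n>0:
--         ind=n%100
--         ind=ind-1
--         if (ind>=0) & (ind<len(A)):
--             text+=A[ind]
--             n=(n-ind+1)//100
--         else:
--             text+='?'
--             n=(n-ind+1)//100
--     return text[::-1]
-- ===== SOURCE B (Python) =====
-- A='abcdefghijklmnopqrstuvwxyz'
--
-- def i_teksta(M):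
--     if M <= 0:
--         return ''
--     d = M % 100
--     c = A[d - 1] if 1 <= d <= 26 else '?'
--     return i_teksta(M // 100) + c
-- ===== Notes on version B (the rewrite author's own statement) =====
-- stated objective: simpler
-- what changed: Replaces the while-loop that accumulates characters least-significant-first through a convoluted update expression and then reverses the accumulated string with a direct recursion that emits characters most-significant-first, needing no accumulator and no final reversal.
import Mathlib
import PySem

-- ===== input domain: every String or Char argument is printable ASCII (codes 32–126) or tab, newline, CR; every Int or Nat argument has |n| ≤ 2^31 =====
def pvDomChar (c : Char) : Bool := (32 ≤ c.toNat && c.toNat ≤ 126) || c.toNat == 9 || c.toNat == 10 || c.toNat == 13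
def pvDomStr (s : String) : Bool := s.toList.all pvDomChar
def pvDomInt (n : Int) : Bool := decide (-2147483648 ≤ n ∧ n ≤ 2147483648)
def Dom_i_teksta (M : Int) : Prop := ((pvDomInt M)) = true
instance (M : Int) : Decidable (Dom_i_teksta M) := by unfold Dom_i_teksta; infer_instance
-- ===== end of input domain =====

-- B replaces A's LSB-first while loop with odd update n=(n-ind+1)//100 plus final reversal
-- by a direct MSB-first recursion with no accumulator and no reversal (objective: simpler).


-- ===== PORT A =====
-- the module constant A = 'abcdefghijklmnopqrstuvwxyz'
def pvAlphabet : List Char := "abcdefghijklmnopqrstuvwxyz".toList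

-- A's while loop, accumulating `text` LSB-first; `fuel` is only a totality guard:
-- n strictly decreases each iteration (pvStepLt below), so fuel = n.toNat never runs out.
def i_teksta_loop (fuel : Nat) (n : Int) (text : List Char) : List Char :=
  match fuel with
  | 0 => text
  | fuel + 1 =>
    if 0 < n then
      let ind := PySem.Int.mod n 100 - 1
      if 0 ≤ ind ∧ ind < PySem.List.len pvAlphabet then
        i_teksta_loop fuel (PySem.Int.floordiv (n - ind + 1) 100)
          (text ++ [PySem.List.pyGetD pvAlphabet ind '?'])
      else
        i_teksta_loop fuel (PySem.Int.floordiv (n - ind + 1) 100) (text ++ ['?'])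
    else text

def i_teksta (M : Int) : String :=
  -- return text[::-1]
  String.ofList ((PySem.List.slice? (i_teksta_loop M.toNat M []) none none (-1)).getD [])

-- ===== PORT B =====
-- termination of B's recursion: M // 100 decreases for 0 < M
theorem pvDivLt (M : Int) (h : ¬ M ≤ 0) : (PySem.Int.floordiv M 100).toNat < M.toNat := by
  simp only [PySem.Int.floordiv, Int.fdiv_eq_ediv]
  omega

def i_teksta_alt (M : Int) : String :=
  if h : M ≤ 0 then "" else
    let d := PySem.Int.mod M 100
    let c : Char := if 1 ≤ d ∧ d ≤ 26 then PySem.List.pyGetD pvAlphabet (d - 1) '?' else '?'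
    i_teksta_alt (PySem.Int.floordiv M 100) ++ String.ofList [c]
termination_by M.toNat
decreasing_by
  exact pvDivLt M h

-- ===== PRECONDITION & SPEC =====
def Spec_i_teksta (M : Int) (out : String) : Prop := out = i_teksta_alt M
instance (M : Int) (out : String) : Decidable (Spec_i_teksta M out) := by unfold Spec_i_teksta; infer_instance

-- ===== CLAIM (what is proved, stated in full; the proofs are below) =====
def Claim_equal_i_teksta : Prop := ∀ (M : Int), Dom_i_teksta M → Spec_i_teksta M (i_teksta M)

-- ===== LEMMAS AND PROOFS =====

-- A's loop really performs n := n / 100 (Euclidean): n - (n%100 - 1) + 1 = 100*(n/100) + 2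
theorem pvStepEq (n : Int) :
    PySem.Int.floordiv (n - (PySem.Int.mod n 100 - 1) + 1) 100 = PySem.Int.floordiv n 100 := by
  simp only [PySem.Int.floordiv, PySem.Int.mod, Int.fdiv_eq_ediv, Int.fmod_eq_emod]
  omega

-- B's recursion, on the character-list level
theorem i_teksta_alt_toList (M : Int) :
    (i_teksta_alt M).toList =
      if M ≤ 0 then [] else
        (i_teksta_alt (PySem.Int.floordiv M 100)).toList ++
          [if 1 ≤ PySem.Int.mod M 100 ∧ PySem.Int.mod M 100 ≤ 26 then
             PySem.List.pyGetD pvAlphabet (PySem.Int.mod M 100 - 1) '?' else '?'] := by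
  by_cases h : M ≤ 0
  · rw [i_teksta_alt, dif_pos h, if_pos h]; rfl
  · rw [i_teksta_alt, dif_neg h, if_neg h]
    simp only [String.toList_append, String.toList_ofList]

-- the loop computes: text ++ reverse of B's character list (given enough fuel)
theorem i_teksta_loop_spec (fuel : Nat) :
    ∀ (n : Int) (text : List Char), n.toNat ≤ fuel →
      i_teksta_loop fuel n text = text ++ (i_teksta_alt n).toList.reverse := by
  induction fuel with
  | zero =>
    intro n text hf
    rw [i_teksta_loop, i_teksta_alt_toList n, if_pos (show n ≤ 0 by omega)]
    simp
  | succ fuel ih =>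
    intro n text hf
    by_cases h : 0 < n
    · have hfn : (PySem.Int.floordiv n 100).toNat ≤ fuel := by
        have := pvDivLt n (not_le.mpr h)
        omega
      have hiff : (0 ≤ PySem.Int.mod n 100 - 1 ∧
            PySem.Int.mod n 100 - 1 < PySem.List.len pvAlphabet)
          ↔ (1 ≤ PySem.Int.mod n 100 ∧ PySem.Int.mod n 100 ≤ 26) := by
        have hlen : PySem.List.len pvAlphabet = 26 := by
          simp [PySem.List.len_eq, pvAlphabet]
        omega
      rw [i_teksta_loop]
      simp only [if_pos h]
      by_cases hc : 1 ≤ PySem.Int.mod n 100 ∧ PySem.Int.mod n 100 ≤ 26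
      · rw [if_pos (hiff.mpr hc), pvStepEq, ih _ _ hfn, i_teksta_alt_toList n,
          if_neg (show ¬ n ≤ 0 by omega), if_pos hc]
        simp
      · rw [if_neg (fun hd => hc (hiff.mp hd)), pvStepEq, ih _ _ hfn, i_teksta_alt_toList n,
          if_neg (show ¬ n ≤ 0 by omega), if_neg hc]
        simp
    · rw [i_teksta_loop]
      simp only [if_neg h]
      rw [i_teksta_alt_toList n, if_pos (show n ≤ 0 by omega)]
      simp

-- ===== VERDICT (by name: the statement is the Claim_ definition above) =====
theorem i_teksta_spec : Claim_equal_i_teksta := by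
  intro M _
  show i_teksta M = i_teksta_alt M
  rw [i_teksta, PySem.List.slice?_none_none_neg_one, i_teksta_loop_spec M.toNat M [] le_rfl]
  simp
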